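-- pv_equiv track=rewrite | github.com/hswek/algorithm | 프로그래머스/3/181186. 아방가르드 타일링/아방가르드 타일링.py | rec
-- ===== SOURCE A (Python) =====
-- def rec(n,cache):
--     if n==2:
--         return 3
--     if n==1:
--         return 1
--     if n==0:
--         return 1
--     if n<0:
--         return 0
--     if n==3:
--         return 10
--     if cache[n]!=-1:
--         return cache[n]
--     a=2
--     if n%3==0:
--         a=4
--     result=(rec(n-1,cache)%1000000007+rec(n-2,cache)*2%1000000007+rec(n-3,cache)*6%1000000007+rec(n-4,cache)-rec(n-6,cache)+1000000007)%1000000007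
--
--     cache[n]=result%1000000007
--     return result%1000000007
-- ===== SOURCE B (Python) =====
-- def rec(n, cache):
--     # Iterative bottom-up version of the memoized recurrence.
--     # Return value matches A everywhere A returns; like A it writes computed
--     # entries into cache (it may fill a few entries A's recursion skips).
--     M = 1000000007
--     if n < 0:
--         return 0
--     if n < 4:
--         return (1, 1, 3, 10)[n]
--     vals = {}
--
--     def c(j):
--         if j < 0:
--             return 0
--         if j < 4:
--             return (1, 1, 3, 10)[j]
--         return vals[j]
--
--     for i in range(4, n + 1):
--         if cache[i] != -1:
--             vals[i] = cache[i]
--         else: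
--             r = (c(i - 1) % M + c(i - 2) * 2 % M + c(i - 3) * 6 % M
--                  + c(i - 4) - c(i - 6) + M) % M
--             vals[i] = r
--             cache[i] = r
--     return vals[n]
-- ===== Notes on version B (the rewrite author's own statement) =====
-- stated objective: alternative
-- what changed: Replaced the top-down memoized recursion with an iterative bottom-up loop that fills a table for indices 4..n (reading pre-set cache entries, base values inline) and dropped the dead variable a; return value identical, the proof covers the return value only.
import Mathlib
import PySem

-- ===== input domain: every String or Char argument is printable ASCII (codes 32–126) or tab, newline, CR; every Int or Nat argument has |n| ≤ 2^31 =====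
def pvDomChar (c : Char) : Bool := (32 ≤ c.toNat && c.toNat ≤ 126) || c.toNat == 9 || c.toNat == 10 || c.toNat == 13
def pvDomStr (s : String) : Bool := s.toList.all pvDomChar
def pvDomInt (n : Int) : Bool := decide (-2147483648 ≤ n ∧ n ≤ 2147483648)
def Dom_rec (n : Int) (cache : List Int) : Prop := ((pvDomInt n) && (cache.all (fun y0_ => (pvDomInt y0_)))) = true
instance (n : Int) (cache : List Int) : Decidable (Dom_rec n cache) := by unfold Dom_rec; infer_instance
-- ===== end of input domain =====

-- B replaces A's memoized top-down recursion by an iterative bottom-up table; return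
-- value is proved equal (both Pythons also write computed entries into cache; B may
-- fill a few entries A's recursion skips — the mutation is not part of the claim).

-- ===== PORT A =====
-- literal port of A's recursion; cache reads use pyGetD (exact inside Pre_rec,
-- where every accessed index is in range); cache writes do not affect the return
-- value (a memo entry always equals the value the recursion would recompute), so
-- the port reads the original cache.
def rec (n : Int) (cache : List Int) : Int :=
  if n = 2 then 3
  else if n = 1 then 1
  else if n = 0 then 1
  else if n < 0 then 0
  else if n = 3 then 10
  else if PySem.List.pyGetD cache n (-1) ≠ -1 then PySem.List.pyGetD cache n (-1)
  else
    let _a : Int := if PySem.Int.mod n 3 = 0 then 4 else 2   -- dead variable a, as in A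
    let result :=
      PySem.Int.mod (PySem.Int.mod (rec (n-1) cache) 1000000007
        + PySem.Int.mod (rec (n-2) cache * 2) 1000000007
        + PySem.Int.mod (rec (n-3) cache * 6) 1000000007
        + rec (n-4) cache - rec (n-6) cache + 1000000007) 1000000007
    PySem.Int.mod result 1000000007
termination_by n.toNat
decreasing_by all_goals omega

-- ===== PORT B =====
-- helper c(j) of Source B: base values below 4, otherwise the table
def pvC (vals : PySem.Dict Int Int) (j : Int) : Int :=
  if j < 0 then 0
  else if j < 4 then PySem.List.pyGetD [1, 1, 3, 10] j 0
  else ((PySem.Dict.get? vals j)).getD 0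

-- one iteration of Source B's for-loop (the cache write is a mutation, not the return value)
def pvStep (cache : List Int) (vals : PySem.Dict Int Int) (i : Int) : PySem.Dict Int Int :=
  if PySem.List.pyGetD cache i (-1) ≠ -1 then
    vals.insert i (PySem.List.pyGetD cache i (-1))
  else
    vals.insert i (PySem.Int.mod (PySem.Int.mod (pvC vals (i-1)) 1000000007
      + PySem.Int.mod (pvC vals (i-2) * 2) 1000000007
      + PySem.Int.mod (pvC vals (i-3) * 6) 1000000007
      + pvC vals (i-4) - pvC vals (i-6) + 1000000007) 1000000007)

def rec_alt (n : Int) (cache : List Int) : Int :=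
  if n < 0 then 0
  else if n < 4 then PySem.List.pyGetD [1, 1, 3, 10] n 0
  else
    (((PySem.List.pyRange 4 (n+1) 1).foldl (pvStep cache) PySem.Dict.empty).get? n).getD 0

-- ===== PRECONDITION & SPEC =====
-- Pre_ excludes exactly the inputs where Python A raises IndexError: n ≥ 4 with cache shorter than n+1.
def Pre_rec (n : Int) (cache : List Int) : Prop := n < 4 ∨ n < (cache.length : Int)
instance (n : Int) (cache : List Int) : Decidable (Pre_rec n cache) := by unfold Pre_rec; infer_instance
def pvWitness_rec : Int × List Int := (6, [-1, -1, -1, -1, -1, -1, -1])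

def Spec_rec (n : Int) (cache : List Int) (out : Int) : Prop := out = rec_alt n cache
instance (n : Int) (cache : List Int) (out : Int) : Decidable (Spec_rec n cache out) := by unfold Spec_rec; infer_instance

-- ===== CLAIM (what is proved, stated in full; the proofs are below) =====
def Claim_equal_rec : Prop := ∀ (n : Int) (cache : List Int), Dom_rec n cache → Pre_rec n cache → Spec_rec n cache (rec n cache)

-- ===== LEMMAS AND PROOFS =====

lemma pvMod_idem (a : Int) :
    PySem.Int.mod (PySem.Int.mod a 1000000007) 1000000007 = PySem.Int.mod a 1000000007 := by
  rw [PySem.Int.mod_eq_emod_of_pos (by norm_num), PySem.Int.mod_eq_emod_of_pos (by norm_num)]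
  exact Int.emod_emod_of_dvd _ dvd_rfl

lemma pvC_eq (cache : List Int) (vals : PySem.Dict Int Int) (m j : Int)
    (hIH : ∀ k, 4 ≤ k → k ≤ m → vals.get? k = some (rec k cache)) (hj : j ≤ m) :
    pvC vals j = rec j cache := by
  by_cases h0 : j < 0
  · rw [pvC, rec]; simp [h0]; omega
  · by_cases h4 : j < 4
    · interval_cases j <;> (rw [pvC, rec]; norm_num [PySem.List.pyGetD]) <;> rfl
    · rw [pvC, if_neg h0, if_neg h4, hIH j (by omega) hj]; rfl

lemma pvStep_eq (cache : List Int) (vals : PySem.Dict Int Int) (m : Int) (hm : 3 ≤ m)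
    (hIH : ∀ k, 4 ≤ k → k ≤ m → vals.get? k = some (rec k cache)) :
    pvStep cache vals (m+1) = vals.insert (m+1) (rec (m+1) cache) := by
  rw [pvStep, rec]
  rw [if_neg (by omega : ¬ (m+1 : Int) = 2), if_neg (by omega : ¬ (m+1 : Int) = 1),
      if_neg (by omega : ¬ (m+1 : Int) = 0), if_neg (by omega : ¬ (m+1 : Int) < 0),
      if_neg (by omega : ¬ (m+1 : Int) = 3)]
  by_cases hc : PySem.List.pyGetD cache (m+1) (-1) ≠ -1
  · rw [if_pos hc, if_pos hc]
  · rw [if_neg hc, if_neg hc]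
    rw [pvC_eq cache vals m (m+1-1) hIH (by omega),
        pvC_eq cache vals m (m+1-2) hIH (by omega),
        pvC_eq cache vals m (m+1-3) hIH (by omega),
        pvC_eq cache vals m (m+1-4) hIH (by omega),
        pvC_eq cache vals m (m+1-6) hIH (by omega)]
    simp only [pvMod_idem]

lemma pvLoop_inv (cache : List Int) (n : Int) (hn : 4 ≤ n) :
    ∀ j, 4 ≤ j → j ≤ n →
      ((PySem.List.pyRange 4 (n+1) 1).foldl (pvStep cache) PySem.Dict.empty).get? j
        = some (rec j cache) := by
  induction n, hn using Int.le_induction with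
  | base =>
    intro j hj1 hj2
    have hj : j = 4 := by omega
    subst hj
    rw [show (4 + 1 : Int) = 4 + 1 from rfl, PySem.List.pyRange_one_singleton]
    simp only [List.foldl_cons, List.foldl_nil]
    rw [show (4 : Int) = 3 + 1 from rfl,
        pvStep_eq cache PySem.Dict.empty 3 (by omega) (by intro k hk1 hk2; omega)]
    exact PySem.Dict.get?_insert_self _ _ _
  | succ m hm ih =>
    intro j hj1 hj2
    rw [show m + 1 + 1 = (m + 1) + 1 from rfl,
        PySem.List.pyRange_one_succ_right (by omega : (4 : Int) ≤ m + 1),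
        List.foldl_append]
    simp only [List.foldl_cons, List.foldl_nil]
    rw [pvStep_eq cache _ m (by omega) ih]
    by_cases hj : j = m + 1
    · subst hj; exact PySem.Dict.get?_insert_self _ _ _
    · rw [PySem.Dict.get?_insert_of_ne _ _ hj]
      exact ih j hj1 (by omega)

-- ===== VERDICT (by name: the statement is the Claim_ definition above) =====
theorem rec_spec : Claim_equal_rec := by
  intro n cache _ _
  unfold Spec_rec
  by_cases h0 : n < 0
  · rw [rec, rec_alt]; simp [h0]; omega
  · by_cases h4 : n < 4
    · interval_cases n <;> (rw [rec, rec_alt]; norm_num [PySem.List.pyGetD]) <;> rfl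
    · rw [rec_alt, if_neg h0, if_neg h4,
          pvLoop_inv cache n (by omega) n (by omega) le_rfl]
      rfl
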